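-- pv_equiv track=rewrite | github.com/a100kpm/daily_training | problem 0246.py | can_cycle
-- ===== SOURCE A (Python) =====
-- def can_cycle(List):
--     dico1=dict()
--     dico2=dict()
--     dico3=dict()
--     for i in List:
--         if i[0]==i[-1]:
--             if i[0] not in dico3:
--                 dico3[i[0]]=1
--         else:
--             if i[0] not in dico1:
--                 dico1[i[0]]=1
--                 dico2[i[0]]=0
--
--             else:
--                 dico1[i[0]]+=1
--
--             if i[-1] not in dico2:
--                 dico1[i[-1]]=0
--                 dico2[i[-1]]=1
--
--             else:
--                 dico2[i[-1]]+=1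
--
--     for i in dico1:
--         if dico1[i]!=dico2[i]:
--             return False
--
--     for i in dico3:
--         if i not in dico1:
--             return False
--
--     return True
-- ===== SOURCE B (Python) =====
-- def can_cycle(List):
--     starts = [w[0] for w in List if w[0] != w[-1]]
--     ends = [w[-1] for w in List if w[0] != w[-1]]
--     selfs = {w[0] for w in List if w[0] == w[-1]}
--     return sorted(starts) == sorted(ends) and selfs <= set(starts) | set(ends)
-- ===== Notes on version B (the rewrite author's own statement) =====
-- stated objective: simpler
-- what changed: B replaces A's three hand-maintained count dictionaries and two post-loop key scans by one-pass comprehensions: sorted(starts)==sorted(ends) checks the out/in multiset balance and a set-inclusion checks the self-loop letters, with no per-key loops; Pre_ excludes lists containing an empty word, on which both A and B raise IndexError.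
import Mathlib
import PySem

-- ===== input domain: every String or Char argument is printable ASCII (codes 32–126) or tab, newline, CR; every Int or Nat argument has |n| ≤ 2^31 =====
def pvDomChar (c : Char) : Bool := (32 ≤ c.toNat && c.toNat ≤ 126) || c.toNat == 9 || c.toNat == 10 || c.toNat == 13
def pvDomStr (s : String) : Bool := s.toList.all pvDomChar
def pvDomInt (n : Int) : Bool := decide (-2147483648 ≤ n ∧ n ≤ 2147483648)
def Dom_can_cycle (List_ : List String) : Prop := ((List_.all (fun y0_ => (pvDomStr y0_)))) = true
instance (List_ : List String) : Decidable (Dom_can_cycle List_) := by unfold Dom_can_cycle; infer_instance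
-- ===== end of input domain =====

-- B checks the word-chaining degree balance with sorted-multiset equality and a set inclusion
-- instead of A's three count dictionaries with per-key comparison loops (objective: simpler).

-- w[0] and w[-1]; the '.getD' default is never reached on Pre_ (every word nonempty)
def pvFirst (w : String) : Char := (PySem.Str.pyGet? w 0).getD ' '
def pvLast (w : String) : Char := (PySem.Str.pyGet? w (-1)).getD ' '

-- ===== PORT A =====
-- one iteration of A's 'for i in List' loop over the state (dico1, dico2, dico3);
-- 'dico[k] += 1' is transliterated as the lookup-then-store 'insert k (getD k 0 + 1)'
-- ('.getD 0' exact: the key is present in the '+=' branch)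
def canCycleStep (st : PySem.Dict Char Int × PySem.Dict Char Int × PySem.Dict Char Int)
    (i : String) : PySem.Dict Char Int × PySem.Dict Char Int × PySem.Dict Char Int :=
  let d1 := st.1
  let d2 := st.2.1
  let d3 := st.2.2
  if pvFirst i = pvLast i then
    if !d3.contains (pvFirst i) then (d1, d2, d3.insert (pvFirst i) 1) else (d1, d2, d3)
  else
    let p :=
      if !d1.contains (pvFirst i) then (d1.insert (pvFirst i) 1, d2.insert (pvFirst i) 0)
      else (d1.insert (pvFirst i) (d1.getD (pvFirst i) 0 + 1), d2)
    if !p.2.contains (pvLast i) then (p.1.insert (pvLast i) 0, p.2.insert (pvLast i) 1, d3)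
    else (p.1, p.2.insert (pvLast i) (p.2.getD (pvLast i) 0 + 1), d3)

def can_cycle (List_ : List String) : Bool :=
  let s := List_.foldl canCycleStep (PySem.Dict.empty, PySem.Dict.empty, PySem.Dict.empty)
  -- 'dico1[i] != dico2[i]': dico1 and dico2 always carry the same key set, so '.getD 0' is exact
  if s.1.items.any (fun p => !(p.2 == (s.2.1).getD p.1 0)) then false
  else if (s.2.2).keys.any (fun k => !(s.1.contains k)) then false
  else true

-- ===== PORT B =====
def can_cycle_alt (List_ : List String) : Bool :=
  let starts := (List_.filter (fun w => !(pvFirst w == pvLast w))).map pvFirst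
  let ends := (List_.filter (fun w => !(pvFirst w == pvLast w))).map pvLast
  let selfs : PySem.Set Char :=
    PySem.Set.ofList ((List_.filter (fun w => pvFirst w == pvLast w)).map pvFirst)
  (PySem.List.sorted starts (fun x => x) false == PySem.List.sorted ends (fun x => x) false)
    && PySem.Set.issubset selfs (PySem.Set.union (PySem.Set.ofList starts) ends)

-- ===== PRECONDITION & SPEC =====
-- Pre_ excludes lists containing an empty word: there both Pythons raise IndexError on w[0]
def Pre_can_cycle (List_ : List String) : Prop := ∀ w ∈ List_, w ≠ ""
instance (List_ : List String) : Decidable (Pre_can_cycle List_) := by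
  unfold Pre_can_cycle; infer_instance
def pvWitness_can_cycle : List String := (["ab", "bc", "ca", "dd", "da", "ad"])

def Spec_can_cycle (List_ : List String) (out : Bool) : Prop := out = can_cycle_alt List_
instance (List_ : List String) (out : Bool) : Decidable (Spec_can_cycle List_ out) := by
  unfold Spec_can_cycle; infer_instance

-- ===== CLAIM (what is proved, stated in full; the proofs are below) =====
def Claim_equal_can_cycle : Prop := ∀ (List_ : List String), Dom_can_cycle List_ → Pre_can_cycle List_ → Spec_can_cycle List_ (can_cycle List_)

-- ===== LEMMAS AND PROOFS =====

-- the three derived per-letter lists of a word list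
def pvStarts (l : List String) : List Char :=
  (l.filter (fun w => !(pvFirst w == pvLast w))).map pvFirst
def pvEnds (l : List String) : List Char :=
  (l.filter (fun w => !(pvFirst w == pvLast w))).map pvLast
def pvSelfs (l : List String) : List Char :=
  (l.filter (fun w => pvFirst w == pvLast w)).map pvFirst

def pvFold (l : List String) : PySem.Dict Char Int × PySem.Dict Char Int × PySem.Dict Char Int :=
  l.foldl canCycleStep (PySem.Dict.empty, PySem.Dict.empty, PySem.Dict.empty)

-- branch equations for one loop step
theorem step_self_new (st : PySem.Dict Char Int × PySem.Dict Char Int × PySem.Dict Char Int)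
    (w : String) (h : pvFirst w = pvLast w) (hc : st.2.2.contains (pvFirst w) = false) :
    canCycleStep st w = (st.1, st.2.1, st.2.2.insert (pvFirst w) 1) := by
  simp [canCycleStep, ← h, hc]

theorem step_self_old (st : PySem.Dict Char Int × PySem.Dict Char Int × PySem.Dict Char Int)
    (w : String) (h : pvFirst w = pvLast w) (hc : st.2.2.contains (pvFirst w) = true) :
    canCycleStep st w = st := by
  simp [canCycleStep, ← h, hc]

theorem step_ff (st : PySem.Dict Char Int × PySem.Dict Char Int × PySem.Dict Char Int)
    (w : String) (h : ¬ pvFirst w = pvLast w) (hc1 : st.1.contains (pvFirst w) = false)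
    (hcb : (st.2.1.insert (pvFirst w) 0).contains (pvLast w) = false) :
    canCycleStep st w =
      ((st.1.insert (pvFirst w) 1).insert (pvLast w) 0,
       (st.2.1.insert (pvFirst w) 0).insert (pvLast w) 1, st.2.2) := by
  simp [canCycleStep, h, hc1, hcb]

theorem step_ft (st : PySem.Dict Char Int × PySem.Dict Char Int × PySem.Dict Char Int)
    (w : String) (h : ¬ pvFirst w = pvLast w) (hc1 : st.1.contains (pvFirst w) = false)
    (hcb : (st.2.1.insert (pvFirst w) 0).contains (pvLast w) = true) :
    canCycleStep st w =
      (st.1.insert (pvFirst w) 1,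
       (st.2.1.insert (pvFirst w) 0).insert (pvLast w)
         ((st.2.1.insert (pvFirst w) 0).getD (pvLast w) 0 + 1), st.2.2) := by
  simp [canCycleStep, h, hc1, hcb]

theorem step_tf (st : PySem.Dict Char Int × PySem.Dict Char Int × PySem.Dict Char Int)
    (w : String) (h : ¬ pvFirst w = pvLast w) (hc1 : st.1.contains (pvFirst w) = true)
    (hcb : st.2.1.contains (pvLast w) = false) :
    canCycleStep st w =
      ((st.1.insert (pvFirst w) (st.1.getD (pvFirst w) 0 + 1)).insert (pvLast w) 0,
       st.2.1.insert (pvLast w) 1, st.2.2) := by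
  simp [canCycleStep, h, hc1, hcb]

theorem step_tt (st : PySem.Dict Char Int × PySem.Dict Char Int × PySem.Dict Char Int)
    (w : String) (h : ¬ pvFirst w = pvLast w) (hc1 : st.1.contains (pvFirst w) = true)
    (hcb : st.2.1.contains (pvLast w) = true) :
    canCycleStep st w =
      (st.1.insert (pvFirst w) (st.1.getD (pvFirst w) 0 + 1),
       st.2.1.insert (pvLast w) (st.2.1.getD (pvLast w) 0 + 1), st.2.2) := by
  simp [canCycleStep, h, hc1, hcb]

-- loop invariant of A's fold: dico1/dico2 hold exactly the letters of non-self words, with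
-- the start-count resp. end-count as value; dico3's keys are the self-loop letters
set_option maxHeartbeats 1000000 in
theorem canCycle_inv (l : List String) :
    (∀ c, (pvFold l).1.contains c = decide (c ∈ pvStarts l ∨ c ∈ pvEnds l)) ∧
    (∀ c, (pvFold l).1.getD c 0 = ((pvStarts l).count c : Int)) ∧
    (∀ c, (pvFold l).2.1.contains c = decide (c ∈ pvStarts l ∨ c ∈ pvEnds l)) ∧
    (∀ c, (pvFold l).2.1.getD c 0 = ((pvEnds l).count c : Int)) ∧
    (∀ c, c ∈ (pvFold l).2.2.keys ↔ c ∈ pvSelfs l) ∧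
    (pvFold l).1.keys.Nodup := by
  induction l using List.reverseRecOn with
  | nil =>
    refine ⟨?_, ?_, ?_, ?_, ?_, ?_⟩ <;>
      simp [pvFold, pvStarts, pvEnds, pvSelfs, PySem.Dict.contains_empty,
        PySem.Dict.getD_empty, PySem.Dict.keys_empty]
  | append_singleton t w ih =>
    obtain ⟨ih1, ih2, ih3, ih4, ih5, ih6⟩ := ih
    have hfold : pvFold (t ++ [w]) = canCycleStep (pvFold t) w := by
      simp [pvFold, List.foldl_append]
    by_cases h : pvFirst w = pvLast w
    · -- self-loop word: only dico3 changes
      have hS : pvStarts (t ++ [w]) = pvStarts t := by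
        simp [pvStarts, List.filter_append, h]
      have hE : pvEnds (t ++ [w]) = pvEnds t := by
        simp [pvEnds, List.filter_append, h]
      have hSel : pvSelfs (t ++ [w]) = pvSelfs t ++ [pvFirst w] := by
        simp [pvSelfs, List.filter_append, h]
      cases hc : (pvFold t).2.2.contains (pvFirst w) with
      | true =>
        have hmem : pvFirst w ∈ pvSelfs t :=
          (ih5 _).1 ((PySem.Dict.contains_iff_mem_keys _ _).mp hc)
        rw [hfold, step_self_old _ _ h hc]
        refine ⟨by simpa [hS, hE] using ih1, by simpa [hS] using ih2,
          by simpa [hS, hE] using ih3, by simpa [hE] using ih4, ?_, ih6⟩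
        intro c
        rw [hSel, ih5 c, List.mem_append]
        constructor
        · exact Or.inl
        · rintro (hk | hk)
          · exact hk
          · simp at hk; subst hk; exact hmem
      | false =>
        rw [hfold, step_self_new _ _ h hc]
        refine ⟨by simpa [hS, hE] using ih1, by simpa [hS] using ih2,
          by simpa [hS, hE] using ih3, by simpa [hE] using ih4, ?_, ih6⟩
        intro c
        rw [hSel, PySem.Dict.mem_keys_insert, ih5 c]
        simp [or_comm]
    · -- chaining word: dico1/dico2 change
      have hS : pvStarts (t ++ [w]) = pvStarts t ++ [pvFirst w] := by
        simp [pvStarts, List.filter_append, h]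
      have hE : pvEnds (t ++ [w]) = pvEnds t ++ [pvLast w] := by
        simp [pvEnds, List.filter_append, h]
      have hSel : pvSelfs (t ++ [w]) = pvSelfs t := by
        simp [pvSelfs, List.filter_append, h]
      have hab : pvLast w ≠ pvFirst w := fun hh => h hh.symm
      cases hc1 : (pvFold t).1.contains (pvFirst w) with
      | true =>
        have haC : pvFirst w ∈ pvStarts t ∨ pvFirst w ∈ pvEnds t := by
          simpa [ih1 (pvFirst w)] using hc1
        cases hcb : (pvFold t).2.1.contains (pvLast w) with
        | true =>
          have hbC : pvLast w ∈ pvStarts t ∨ pvLast w ∈ pvEnds t := by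
            simpa [ih3 (pvLast w)] using hcb
          rw [hfold, step_tt _ _ h hc1 hcb]
          refine ⟨?_, ?_, ?_, ?_, by simpa [hSel] using ih5,
            PySem.Dict.nodup_keys_insert _ _ _ ih6⟩
          · intro c
            rw [PySem.Dict.contains_insert, ih1 c, hS, hE, Bool.eq_iff_iff]
            by_cases hca : c = pvFirst w <;> by_cases hcb2 : c = pvLast w <;>
              simp [hca, hcb2, h] <;> tauto
          · intro c
            rw [PySem.Dict.getD_insert, hS, ih2]
            by_cases hca : c = pvFirst w <;>
              simp [hca, List.count_append, ih2, List.count_singleton, beq_iff_eq] <;>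
              (try exact fun hh => hca hh.symm) <;> (try exact fun hh => hcb2 hh.symm)
          · intro c
            rw [PySem.Dict.contains_insert, ih3 c, hS, hE, Bool.eq_iff_iff]
            by_cases hca : c = pvFirst w <;> by_cases hcb2 : c = pvLast w <;>
              simp [hca, hcb2, h] <;> tauto
          · intro c
            rw [PySem.Dict.getD_insert, hE, ih4]
            by_cases hcb2 : c = pvLast w <;>
              simp [hcb2, List.count_append, ih4, List.count_singleton, beq_iff_eq] <;>
              (try exact fun hh => hca hh.symm) <;> (try exact fun hh => hcb2 hh.symm)
        | false =>
          have hbC : ¬ (pvLast w ∈ pvStarts t ∨ pvLast w ∈ pvEnds t) := by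
            simpa [ih3 (pvLast w)] using hcb
          have hbS : pvLast w ∉ pvStarts t := fun hh => hbC (Or.inl hh)
          have hbE : pvLast w ∉ pvEnds t := fun hh => hbC (Or.inr hh)
          rw [hfold, step_tf _ _ h hc1 hcb]
          refine ⟨?_, ?_, ?_, ?_, by simpa [hSel] using ih5,
            PySem.Dict.nodup_keys_insert _ _ _ (PySem.Dict.nodup_keys_insert _ _ _ ih6)⟩
          · intro c
            rw [PySem.Dict.contains_insert, PySem.Dict.contains_insert, ih1 c, hS, hE,
              Bool.eq_iff_iff]
            by_cases hca : c = pvFirst w <;> by_cases hcb2 : c = pvLast w <;>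
              simp [hca, hcb2, h] <;> tauto
          · intro c
            rw [PySem.Dict.getD_insert, PySem.Dict.getD_insert, hS]
            by_cases hca : c = pvFirst w <;> by_cases hcb2 : c = pvLast w <;>
              simp [hca, hcb2, h, hab, List.count_append, ih2, List.count_singleton,
                beq_iff_eq, List.count_eq_zero_of_not_mem hbS] <;>
              (try exact fun hh => hca hh.symm) <;> (try exact fun hh => hcb2 hh.symm)
          · intro c
            rw [PySem.Dict.contains_insert, ih3 c, hS, hE, Bool.eq_iff_iff]
            by_cases hca : c = pvFirst w <;> by_cases hcb2 : c = pvLast w <;>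
              simp [hca, hcb2, h] <;> tauto
          · intro c
            rw [PySem.Dict.getD_insert, hE, ih4]
            by_cases hcb2 : c = pvLast w <;>
              simp [hcb2, List.count_append, List.count_singleton, beq_iff_eq,
                List.count_eq_zero_of_not_mem hbE] <;>
              (try exact fun hh => hca hh.symm) <;> (try exact fun hh => hcb2 hh.symm)
      | false =>
        have haC : ¬ (pvFirst w ∈ pvStarts t ∨ pvFirst w ∈ pvEnds t) := by
          simpa [ih1 (pvFirst w)] using hc1
        have haS : pvFirst w ∉ pvStarts t := fun hh => haC (Or.inl hh)
        have haE : pvFirst w ∉ pvEnds t := fun hh => haC (Or.inr hh)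
        cases hcb0 : (pvFold t).2.1.contains (pvLast w) with
        | true =>
          have hbC : pvLast w ∈ pvStarts t ∨ pvLast w ∈ pvEnds t := by
            simpa [ih3 (pvLast w)] using hcb0
          have hcb : ((pvFold t).2.1.insert (pvFirst w) 0).contains (pvLast w) = true := by
            rw [PySem.Dict.contains_insert, hcb0]; simp
          rw [hfold, step_ft _ _ h hc1 hcb]
          refine ⟨?_, ?_, ?_, ?_, by simpa [hSel] using ih5,
            PySem.Dict.nodup_keys_insert _ _ _ ih6⟩
          · intro c
            rw [PySem.Dict.contains_insert, ih1 c, hS, hE, Bool.eq_iff_iff]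
            by_cases hca : c = pvFirst w <;> by_cases hcb2 : c = pvLast w <;>
              simp [hca, hcb2, h] <;> tauto
          · intro c
            rw [PySem.Dict.getD_insert, hS]
            by_cases hca : c = pvFirst w <;>
              simp [hca, List.count_append, ih2, List.count_singleton, beq_iff_eq,
                List.count_eq_zero_of_not_mem haS] <;>
              (try exact fun hh => hca hh.symm) <;> (try exact fun hh => hcb2 hh.symm)
          · intro c
            rw [PySem.Dict.contains_insert, PySem.Dict.contains_insert, ih3 c, hS, hE,
              Bool.eq_iff_iff]
            by_cases hca : c = pvFirst w <;> by_cases hcb2 : c = pvLast w <;>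
              simp [hca, hcb2, h] <;> tauto
          · intro c
            rw [PySem.Dict.getD_insert, hE]
            by_cases hcb2 : c = pvLast w
            · subst hcb2
              rw [if_pos rfl, PySem.Dict.getD_insert, if_neg hab, ih4]
              simp [List.count_append, List.count_singleton]
            · rw [if_neg hcb2, PySem.Dict.getD_insert, ih4]
              by_cases hca : c = pvFirst w
              · subst hca
                rw [if_pos rfl]
                simp [List.count_append, List.count_singleton', beq_iff_eq, hab,
                  List.count_eq_zero_of_not_mem haE]
              · rw [if_neg hca]
                have hbc : ¬ pvLast w = c := fun hh => hcb2 hh.symm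
                simp [List.count_append, List.count_singleton', beq_iff_eq, hbc]
        | false =>
          have hbC : ¬ (pvLast w ∈ pvStarts t ∨ pvLast w ∈ pvEnds t) := by
            simpa [ih3 (pvLast w)] using hcb0
          have hbS : pvLast w ∉ pvStarts t := fun hh => hbC (Or.inl hh)
          have hbE : pvLast w ∉ pvEnds t := fun hh => hbC (Or.inr hh)
          have hcb : ((pvFold t).2.1.insert (pvFirst w) 0).contains (pvLast w) = false := by
            rw [PySem.Dict.contains_insert, hcb0]
            simp [hab]
          rw [hfold, step_ff _ _ h hc1 hcb]
          refine ⟨?_, ?_, ?_, ?_, by simpa [hSel] using ih5,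
            PySem.Dict.nodup_keys_insert _ _ _ (PySem.Dict.nodup_keys_insert _ _ _ ih6)⟩
          · intro c
            rw [PySem.Dict.contains_insert, PySem.Dict.contains_insert, ih1 c, hS, hE,
              Bool.eq_iff_iff]
            by_cases hca : c = pvFirst w <;> by_cases hcb2 : c = pvLast w <;>
              simp [hca, hcb2, h] <;> tauto
          · intro c
            rw [PySem.Dict.getD_insert, PySem.Dict.getD_insert, hS]
            by_cases hca : c = pvFirst w <;> by_cases hcb2 : c = pvLast w <;>
              simp [hca, hcb2, h, hab, List.count_append, ih2, List.count_singleton,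
                beq_iff_eq, List.count_eq_zero_of_not_mem haS,
                List.count_eq_zero_of_not_mem hbS] <;>
              (try exact fun hh => hca hh.symm) <;> (try exact fun hh => hcb2 hh.symm)
          · intro c
            rw [PySem.Dict.contains_insert, PySem.Dict.contains_insert, ih3 c, hS, hE,
              Bool.eq_iff_iff]
            by_cases hca : c = pvFirst w <;> by_cases hcb2 : c = pvLast w <;>
              simp [hca, hcb2, h] <;> tauto
          · intro c
            rw [PySem.Dict.getD_insert, PySem.Dict.getD_insert, hE]
            by_cases hca : c = pvFirst w <;> by_cases hcb2 : c = pvLast w <;>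
              simp [hca, hcb2, h, hab, List.count_append, ih4, List.count_singleton,
                beq_iff_eq, List.count_eq_zero_of_not_mem haE,
                List.count_eq_zero_of_not_mem hbE] <;>
              (try exact fun hh => hca hh.symm) <;> (try exact fun hh => hcb2 hh.symm)

-- the common characterisation: balanced start/end counts, self letters covered
def pvBalanced (l : List String) : Prop :=
  (∀ c, List.count c (pvStarts l) = List.count c (pvEnds l)) ∧
  (∀ c ∈ pvSelfs l, c ∈ pvStarts l ∨ c ∈ pvEnds l)

theorem can_cycle_form (l : List String) :
    can_cycle l =
      (!((pvFold l).1.items.any (fun p => !(p.2 == (pvFold l).2.1.getD p.1 0))) &&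
       !((pvFold l).2.2.keys.any (fun k => !((pvFold l).1.contains k)))) := by
  have hpv : List.foldl canCycleStep (PySem.Dict.empty, PySem.Dict.empty, PySem.Dict.empty) l
      = pvFold l := rfl
  unfold can_cycle
  rw [hpv]
  cases h1 : (pvFold l).1.items.any (fun p => !(p.2 == (pvFold l).2.1.getD p.1 0)) <;>
    cases h2 : (pvFold l).2.2.keys.any (fun k => !((pvFold l).1.contains k)) <;>
      simp [h1, h2]

theorem can_cycle_iff (l : List String) : can_cycle l = true ↔ pvBalanced l := by
  obtain ⟨ih1, ih2, ih3, ih4, ih5, ih6⟩ := canCycle_inv l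
  rw [can_cycle_form]
  simp only [Bool.and_eq_true, Bool.not_eq_true', List.any_eq_false, Bool.not_eq_false]
  constructor
  · rintro ⟨h1, h2⟩
    constructor
    · intro c
      by_cases hc : c ∈ pvStarts l ∨ c ∈ pvEnds l
      · have hcont : (pvFold l).1.contains c = true := by
          rw [ih1]; exact decide_eq_true hc
        rw [PySem.Dict.contains_eq_isSome_get?] at hcont
        obtain ⟨v, hv⟩ := Option.isSome_iff_exists.mp hcont
        have hmemit : (c, v) ∈ (pvFold l).1.items :=
          PySem.Dict.mem_items_of_get?_eq_some _ hv
        have hpv := h1 _ hmemit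
        rw [beq_iff_eq] at hpv
        have hv1 : (pvFold l).1.getD c 0 = v := by
          rw [PySem.Dict.getD_eq_get?_getD, hv]; rfl
        rw [ih2] at hv1
        rw [ih4 c] at hpv
        exact Nat.cast_inj.mp (hv1.trans hpv)
      · push_neg at hc
        rw [List.count_eq_zero_of_not_mem hc.1, List.count_eq_zero_of_not_mem hc.2]
    · intro c hcSel
      have hthis := h2 _ ((ih5 c).2 hcSel)
      rw [ih1] at hthis
      exact of_decide_eq_true hthis
  · rintro ⟨h1, h2⟩
    refine ⟨?_, ?_⟩
    · intro p hp
      have hget : (pvFold l).1.get? p.1 = some p.2 :=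
        PySem.Dict.get?_of_mem_items _ (by simpa using hp) ih6
      have hv1 : (pvFold l).1.getD p.1 0 = p.2 := by
        rw [PySem.Dict.getD_eq_get?_getD, hget]; rfl
      rw [ih2] at hv1
      rw [beq_iff_eq, ih4, ← hv1, h1 p.1]
    · intro k hk
      rw [ih1]
      exact decide_eq_true (h2 k ((ih5 k).1 hk))

theorem can_cycle_alt_iff (l : List String) : can_cycle_alt l = true ↔ pvBalanced l := by
  show ((PySem.List.sorted (pvStarts l) (fun x => x) false ==
          PySem.List.sorted (pvEnds l) (fun x => x) false) &&
        PySem.Set.issubset (PySem.Set.ofList (pvSelfs l))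
          (PySem.Set.union (PySem.Set.ofList (pvStarts l)) (pvEnds l))) = true ↔ _
  rw [Bool.and_eq_true, beq_iff_eq, PySem.List.sorted_id_eq_sorted_id_iff_perm,
    List.perm_iff_count, PySem.Set.issubset_iff]
  unfold pvBalanced
  constructor <;> rintro ⟨h1, h2⟩ <;> refine ⟨fun c => h1 c, ?_⟩
  · intro c hc
    have hm := h2 c ((PySem.Set.mem_ofList _ _).mpr hc)
    rcases (PySem.Set.mem_union _ _ _).mp hm with hm | hm
    · exact Or.inl ((PySem.Set.mem_ofList _ _).mp hm)
    · exact Or.inr hm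
  · intro x hx
    rcases h2 x ((PySem.Set.mem_ofList _ _).mp hx) with hm | hm
    · exact (PySem.Set.mem_union _ _ _).mpr (Or.inl ((PySem.Set.mem_ofList _ _).mpr hm))
    · exact (PySem.Set.mem_union _ _ _).mpr (Or.inr hm)

-- ===== VERDICT (by name: the statement is the Claim_ definition above) =====
theorem can_cycle_spec : Claim_equal_can_cycle := by
  intro l _ _
  unfold Spec_can_cycle
  exact Bool.eq_iff_iff.mpr ((can_cycle_iff l).trans (can_cycle_alt_iff l).symm)
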